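-- pv_equiv track=rewrite | github.com/ZhuoZhuoCrayon/my-Nodes | Python/tools/expression_utils/range2re.py | split_range_right
-- ===== SOURCE A (Python) =====
-- from typing import List, Tuple
--
-- class RangePosition:
--     BEGIN = 0
--     END = 1
--
-- def get_lower_range(end: int) -> Tuple[int, int]:
--     """
--     以end为上界，获取可正则化的最大范围
--     大致规则如下：
--     取得的下界的位数=end位数
--     将end的最后一位变成0，得到的范围是可正则化的
--     从个位数起，若位值为9，将它上一位 置0得到的范围是可正则化的
--     """
--     begin_str = str(end)
--     for index in range(len(begin_str) - 1, -1, -1):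
--         if begin_str[index] == "9":
--             begin_str = "0".join([begin_str[:index], begin_str[index + 1:]])
--         else:
--             begin_str = "0".join([begin_str[:index], begin_str[index + 1:]])
--             break
--     return int(begin_str), end
--
-- def split_range_right(begin: int, end: int) -> List[Tuple[int, int]]:
--     """将一个范围切割成若干可正则化范围
--     从end->begin切割，得到的最后一个范围的下界<=begin
--     """
--     split_range_list = []
--     while begin < end:
--         range_part = get_lower_range(end)
--         split_range_list.append(range_part)
--         end = range_part[RangePosition.BEGIN] - 1
--     split_range_list.reverse()
--     return split_range_list
-- ===== SOURCE B (Python) =====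
-- from typing import List, Tuple
--
--
-- def split_range_right(begin: int, end: int) -> List[Tuple[int, int]]:
--     """Closed-form splitting: the lower bounds of the regularizable sub-ranges
--     are exactly 0 together with the distinct truncations (end+1)//10**k * 10**k
--     that are <= end; each lower bound pairs with the next one minus 1 (the
--     topmost with end itself), keeping the ranges whose upper bound exceeds begin.
--     """
--     if end <= begin:
--         return []
--     n1 = end + 1
--     desc = []                       # truncation cut points, descending
--     p = 1
--     while p <= n1:
--         v = n1 // p * p
--         if v <= end and n1 // (p * 10) * (p * 10) < v:
--             desc.append(v)
--         p *= 10
--     lowers = [0] + desc[::-1]       # ascending lower bounds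
--     out = []
--     for i, lo in enumerate(lowers):
--         up = lowers[i + 1] - 1 if i + 1 < len(lowers) else end
--         if up > begin:
--             out.append((lo, up))
--     return out
-- ===== Notes on version B (the rewrite author's own statement) =====
-- stated objective: alternative
-- what changed: A peels ranges off the top one at a time, re-deriving each lower bound by mutating the decimal string of the current end; B computes all cut points at once in closed form -- the distinct truncations (end+1)//10**k*10**k that are <= end, plus 0 -- and zips adjacent cut points into the ranges, filtering by begin; no digit-9 inspection and no per-range recomputation.
import Mathlib
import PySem

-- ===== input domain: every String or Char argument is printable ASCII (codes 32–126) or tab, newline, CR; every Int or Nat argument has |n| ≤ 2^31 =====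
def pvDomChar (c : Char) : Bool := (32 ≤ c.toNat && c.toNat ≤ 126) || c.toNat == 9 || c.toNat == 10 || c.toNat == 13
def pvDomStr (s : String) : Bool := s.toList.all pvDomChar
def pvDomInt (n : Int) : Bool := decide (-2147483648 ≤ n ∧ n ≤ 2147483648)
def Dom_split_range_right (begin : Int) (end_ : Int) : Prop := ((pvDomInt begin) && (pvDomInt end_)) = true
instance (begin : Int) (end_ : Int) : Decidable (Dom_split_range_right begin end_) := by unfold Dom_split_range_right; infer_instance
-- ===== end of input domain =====

-- B replaces A's peel-one-range-at-a-time loop (string surgery on str(end) per range) by a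
-- closed form: the lower bounds are the distinct truncations (end+1)//10^k*10^k that are
-- ≤ end, plus 0, computed once and zipped into adjacent ranges (objective: alternative).


-- ===== PORT A =====
-- int(begin_str): hand port of int() restricted to the strings this function feeds it —
-- a nonempty run of decimal digits, optionally preceded by '-' (str(end) with some digits
-- replaced by '0').  On exactly these lists it is what CPython's int() computes.
def pvDigitsVal (cs : List Char) : Int :=
  cs.foldl (fun a c => 10 * a + ((c.toNat : Int) - 48)) 0

def pvParseInt (cs : List Char) : Int :=
  if cs.head? = some '-' then -(pvDigitsVal cs.tail) else pvDigitsVal cs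

-- the for-loop of get_lower_range, running index from len-1 down to 0;
-- "0".join([s[:index], s[index+1:]]) is s with position index replaced by '0'
-- (index is always in [0, len s); List.take/drop/getD are exact for these slices/lookups)
def pvGlrLoop (s : List Char) (index : Nat) : List Char :=
  let s' := s.take index ++ '0' :: s.drop (index + 1)
  if s.getD index ' ' = '9' then
    match index with
    | 0 => s'                -- range exhausted
    | i + 1 => pvGlrLoop s' i
  else s'                    -- break

def pvGetLowerRange (end_ : Int) : Int × Int :=
  let s := PySem.Int.toChars end_   -- str(end)
  (pvParseInt (pvGlrLoop s (s.length - 1)), end_)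

-- the while loop; fuel (end-begin).toNat bounds the iterations actually taken on every
-- input where the Python loop terminates (each step decreases end by at least 1)
def pvLoopA (begin : Int) : Nat → Int → List (Int × Int) → List (Int × Int)
  | 0, _, acc => acc
  | fuel + 1, e, acc =>
    if begin < e then
      let rp := pvGetLowerRange e
      pvLoopA begin fuel (rp.1 - 1) (acc ++ [rp])
    else acc

def split_range_right (begin : Int) (end_ : Int) : List (Int × Int) :=
  (pvLoopA begin (end_ - begin).toNat end_ []).reverse

-- ===== PORT B =====
-- the cut-point while loop of Source B: p runs over powers of ten while p <= end+1, keeping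
-- the truncation v = (end+1)//p*p when v <= end and v exceeds the next coarser truncation;
-- fuel (end_+1).toNat+1 bounds the iterations the Python loop actually takes
def pvCutsLoop (e : Int) : Nat → Int → List Int → List Int
  | 0, _, desc => desc
  | fuel + 1, p, desc =>
    if p ≤ e + 1 then
      let v := PySem.Int.floordiv (e + 1) p * p
      let desc' := if v ≤ e ∧ PySem.Int.floordiv (e + 1) (p * 10) * (p * 10) < v then desc ++ [v] else desc
      pvCutsLoop e fuel (p * 10) desc'
    else desc

-- the pairing for-loop: each lower bound pairs with the next lower bound minus one
-- (pvUpOf is Source B's conditional expression "lowers[i+1]-1 if i+1 < len(lowers) else end");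
-- keep the pair when its upper bound exceeds begin
def pvUpOf (e : Int) : List Int → Int
  | [] => e
  | nx :: _ => nx - 1

def pvPairUp (begin e : Int) : List Int → List (Int × Int)
  | [] => []
  | lo :: rest =>
    if begin < pvUpOf e rest then (lo, pvUpOf e rest) :: pvPairUp begin e rest
    else pvPairUp begin e rest

def split_range_right_alt (begin : Int) (end_ : Int) : List (Int × Int) :=
  if end_ ≤ begin then []
  else pvPairUp begin end_ (0 :: (pvCutsLoop end_ ((end_ + 1).toNat + 1) 1 []).reverse)

-- ===== PRECONDITION & SPEC =====
-- Pre_ excludes exactly the inputs on which A never returns: if begin ≤ -2 and begin < end,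
-- the while loop drives end to -1 and then repeats forever, because get_lower_range of -1
-- yields lower bound 0 and end is reset to -1 on every iteration.
def Pre_split_range_right (begin : Int) (end_ : Int) : Prop :=
  end_ ≤ begin ∨ -1 ≤ begin
instance (begin : Int) (end_ : Int) : Decidable (Pre_split_range_right begin end_) := by
  unfold Pre_split_range_right; infer_instance

def pvWitness_split_range_right : Int × Int := (3, 1234)

def Spec_split_range_right (begin : Int) (end_ : Int) (out : List (Int × Int)) : Prop :=
  out = split_range_right_alt begin end_
instance (begin : Int) (end_ : Int) (out : List (Int × Int)) :
    Decidable (Spec_split_range_right begin end_ out) := by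
  unfold Spec_split_range_right; infer_instance

-- ===== CLAIM (what is proved, stated in full; the proofs are below) =====
def Claim_equal_split_range_right : Prop :=
  ∀ (begin : Int) (end_ : Int), Dom_split_range_right begin end_ →
    Pre_split_range_right begin end_ →
    Spec_split_range_right begin end_ (split_range_right begin end_)

-- ===== LEMMAS AND PROOFS =====

-- A's arithmetic lower bound: strip trailing 9-digits of e, then zero one more digit
def pvStrip (q : Int) (scale : Int) : Int × Int :=
  if h : PySem.Int.mod q 10 = 9 ∧ 0 < q then
    pvStrip (PySem.Int.floordiv q 10) (scale * 10)
  else (q, scale)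
termination_by q.toNat
decreasing_by
  simp only [PySem.Int.floordiv_eq_ediv_of_pos (show (0:Int) < 10 by omega)]
  omega

def pvLowB (e : Int) : Int :=
  PySem.Int.floordiv (pvStrip e 10).1 10 * (pvStrip e 10).2

-- number of trailing 9-digits
def t9 (n : Nat) : Nat :=
  if h : n % 10 = 9 then t9 (n / 10) + 1 else 0
termination_by n
decreasing_by omega

-- the lower bound, in Nat arithmetic
def lowN (n : Nat) : Nat := n / 10 ^ (t9 n + 1) * 10 ^ (t9 n + 1)

-- truncation of n+1 at digit position k
def trunc (n k : Nat) : Nat := (n + 1) / 10 ^ k * 10 ^ k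

def entryf (n j : Nat) : Option Int :=
  if trunc n j ≤ n ∧ trunc n (j + 1) < trunc n j then some ((trunc n j : Int)) else none

def keptB (n k b : Nat) : List Int := (List.range' k (b - k)).filterMap (entryf n)

def descSpec (n : Nat) : List Int :=
  if h : lowN n = 0 then [] else ((lowN n : Int)) :: descSpec (lowN n - 1)
termination_by n
decreasing_by
  have h1 : lowN n ≤ n := Nat.div_mul_le_self _ _
  omega

-- ---- structure of Nat.toDigits 10 ----

theorem tdc_acc (f : Nat) : ∀ (n : Nat) (l : List Char),
    Nat.toDigitsCore 10 f n l = Nat.toDigitsCore 10 f n [] ++ l := by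
  induction f with
  | zero => intro n l; rfl
  | succ g ih =>
    intro n l
    simp only [Nat.toDigitsCore]
    by_cases h : n / 10 = 0
    · simp [h]
    · simp only [h]
      rw [ih (n / 10) ((n % 10).digitChar :: l), ih (n / 10) [(n % 10).digitChar]]
      simp

theorem tdc_fuel (f : Nat) : ∀ (f' n : Nat) (l : List Char),
    n < 10 ^ (f + 1) → n < 10 ^ (f' + 1) →
    Nat.toDigitsCore 10 (f + 1) n l = Nat.toDigitsCore 10 (f' + 1) n l := by
  induction f with
  | zero =>
    intro f' n l h1 h2
    have hn : n / 10 = 0 := by omega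
    cases f' with
    | zero => rfl
    | succ g => simp only [Nat.toDigitsCore, hn]; rfl
  | succ g ih =>
    intro f' n l h1 h2
    by_cases hn : n / 10 = 0
    · cases f' with
      | zero => simp only [Nat.toDigitsCore, hn]; rfl
      | succ g' => simp only [Nat.toDigitsCore, hn]; rfl
    · have h10 : 10 ≤ n := by omega
      have hf' : f' ≠ 0 := by
        rintro rfl; simp at h2; omega
      obtain ⟨g', rfl⟩ := Nat.exists_eq_succ_of_ne_zero hf'
      simp only [Nat.toDigitsCore, hn]
      exact ih g' (n / 10) _ (by rw [pow_succ] at h1; omega) (by rw [pow_succ] at h2; omega)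

theorem toDigits10_small {n : Nat} (h : n < 10) : Nat.toDigits 10 n = [Nat.digitChar n] := by
  have hn : n / 10 = 0 := by omega
  simp only [Nat.toDigits, Nat.toDigitsCore, hn, Nat.mod_eq_of_lt h]
  rfl

theorem tdc_unfold (f n : Nat) : Nat.toDigitsCore 10 (f + 1) n [] =
    (if n / 10 = 0 then [(n % 10).digitChar]
     else Nat.toDigitsCore 10 f (n / 10) [(n % 10).digitChar]) := rfl

theorem toDigits10_step {n : Nat} (h : 10 ≤ n) :
    Nat.toDigits 10 n = Nat.toDigits 10 (n / 10) ++ [Nat.digitChar (n % 10)] := by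
  obtain ⟨g, hg⟩ : ∃ g, n = g + 1 + 1 := ⟨n - 2, by omega⟩
  subst hg
  have hn : ¬((g + 1 + 1) / 10 = 0) := by omega
  have ha : g + 1 + 1 < 10 ^ (g + 1 + 1) := Nat.lt_pow_self (by omega)
  have hc : (g + 1 + 1) / 10 < 10 ^ ((g + 1 + 1) / 10 + 1) :=
    lt_of_lt_of_le (Nat.lt_pow_self (by omega))
      (Nat.pow_le_pow_right (by omega) (by omega))
  rw [Nat.toDigits, tdc_unfold, if_neg hn, tdc_acc,
      tdc_fuel (g + 1) ((g + 1 + 1) / 10) ((g + 1 + 1) / 10) [] (by omega) hc]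
  rfl

-- ---- digit characters ----

theorem digitChar_toNat {r : Nat} (h : r < 10) :
    ((Nat.digitChar r).toNat : Int) = 48 + r := by
  interval_cases r <;> decide

theorem digitChar_eq_nine_iff {r : Nat} (h : r < 10) : Nat.digitChar r = '9' ↔ r = 9 := by
  interval_cases r <;> decide

theorem digitChar_ne_minus {r : Nat} (h : r < 10) : Nat.digitChar r ≠ '-' := by
  interval_cases r <;> decide

theorem toDigits_chars (n : Nat) : ∀ c ∈ Nat.toDigits 10 n, ∃ r, r < 10 ∧ c = Nat.digitChar r := by
  induction n using Nat.strong_induction_on with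
  | _ n ih =>
    by_cases h : n < 10
    · rw [toDigits10_small h]
      intro c hc
      simp at hc
      exact ⟨n, h, hc⟩
    · rw [toDigits10_step (by omega)]
      intro c hc
      rcases List.mem_append.mp hc with h1 | h1
      · exact ih (n / 10) (by omega) c h1
      · simp at h1
        exact ⟨n % 10, by omega, h1⟩

-- ---- the hand-ported digit fold ----

theorem pvDigitsVal_append (xs : List Char) (c : Char) :
    pvDigitsVal (xs ++ [c]) = 10 * pvDigitsVal xs + ((c.toNat : Int) - 48) := by
  simp [pvDigitsVal, List.foldl_append]

theorem pvDigitsVal_toDigits (n : Nat) : pvDigitsVal (Nat.toDigits 10 n) = (n : Int) := by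
  induction n using Nat.strong_induction_on with
  | _ n ih =>
    by_cases h : n < 10
    · rw [toDigits10_small h]
      have := digitChar_toNat h
      simp [pvDigitsVal]
      omega
    · rw [toDigits10_step (by omega), pvDigitsVal_append, ih (n / 10) (by omega),
        digitChar_toNat (by omega : n % 10 < 10)]
      have h1 : (10 : Int) * ((n : Nat) / 10 : Nat) + ((n : Nat) % 10 : Nat) = (n : Int) := by
        push_cast
        omega
      push_cast
      omega

-- ---- the inner loop of get_lower_range ----

theorem pvGlrLoop_append (idx : Nat) : ∀ (s t : List Char), idx < s.length →
    pvGlrLoop (s ++ t) idx = pvGlrLoop s idx ++ t := by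
  induction idx with
  | zero =>
    intro s t h
    simp only [pvGlrLoop]
    rw [List.getD_eq_getElem?_getD, List.getD_eq_getElem?_getD, List.getElem?_append_left h]
    simp [List.drop_append_of_le_length (by omega : 0 + 1 ≤ s.length)]
  | succ i ihx =>
    intro s t h
    simp only [pvGlrLoop]
    rw [List.getD_eq_getElem?_getD, List.getD_eq_getElem?_getD, List.getElem?_append_left h,
      List.take_append_of_le_length (by omega : i + 1 ≤ s.length),
      List.drop_append_of_le_length (by omega : i + 1 + 1 ≤ s.length)]
    by_cases hc : s[i+1]?.getD ' ' = '9'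
    · rw [if_pos hc, if_pos hc]
      have := ihx (s.take (i + 1) ++ '0' :: s.drop (i + 1 + 1)) t
        (by simp [List.length_take]; omega)
      rw [← this]
      simp
    · rw [if_neg hc, if_neg hc]
      simp

theorem mem_replaced {s : List Char} {idx : Nat} {c : Char}
    (h : c ∈ s.take idx ++ '0' :: s.drop (idx + 1)) : c = '0' ∨ c ∈ s := by
  rcases List.mem_append.mp h with h1 | h1
  · right; exact List.mem_of_mem_take h1
  · rcases List.mem_cons.mp h1 with h2 | h2
    · left; exact h2
    · right; exact List.mem_of_mem_drop h2

theorem pvGlrLoop_mem (idx : Nat) : ∀ (s : List Char) (c : Char),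
    c ∈ pvGlrLoop s idx → c = '0' ∨ c ∈ s := by
  induction idx with
  | zero =>
    intro s c hc
    simp only [pvGlrLoop] at hc
    split at hc <;> exact mem_replaced hc
  | succ i ihx =>
    intro s c hc
    simp only [pvGlrLoop] at hc
    split at hc
    · rcases ihx _ c hc with h | h
      · left; exact h
      · exact mem_replaced h
    · exact mem_replaced hc

-- ---- the strip loop ----

theorem pvStrip_unfold (q sc : Int) :
    pvStrip q sc =
      if PySem.Int.mod q 10 = 9 ∧ 0 < q then
        pvStrip (PySem.Int.floordiv q 10) (sc * 10)
      else (q, sc) := by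
  rw [pvStrip]
  split <;> rfl

theorem pvStrip_natCast (n : Nat) (sc : Int) :
    pvStrip (n : Int) sc =
      if n % 10 = 9 then pvStrip ((n / 10 : Nat) : Int) (sc * 10) else ((n : Int), sc) := by
  have hmod : PySem.Int.mod (n : Int) 10 = ((n % 10 : Nat) : Int) := by
    exact_mod_cast PySem.Int.mod_natCast n 10
  have hdiv : PySem.Int.floordiv (n : Int) 10 = ((n / 10 : Nat) : Int) := by
    exact_mod_cast PySem.Int.floordiv_natCast n 10
  rw [pvStrip_unfold]
  by_cases h : n % 10 = 9
  · rw [if_pos h, if_pos ⟨by rw [hmod, h]; rfl, by omega⟩, hdiv]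
  · rw [if_neg h, if_neg]
    rintro ⟨h1, h2⟩
    rw [hmod] at h1
    omega

theorem pvStrip_scale (m : Nat) : ∀ (q sc : Int), q.toNat = m →
    pvStrip q (sc * 10) = ((pvStrip q sc).1, (pvStrip q sc).2 * 10) := by
  induction m using Nat.strong_induction_on with
  | _ m ih =>
    intro q sc hm
    rw [pvStrip_unfold q (sc * 10), pvStrip_unfold q sc]
    by_cases h : PySem.Int.mod q 10 = 9 ∧ 0 < q
    · rw [if_pos h, if_pos h]
      have hq : (PySem.Int.floordiv q 10).toNat < m := by
        have h2 := h.2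
        rw [PySem.Int.floordiv_eq_ediv_of_pos (by omega : (0:Int) < 10)]
        omega
      exact ih _ hq _ (sc * 10) rfl
    · rw [if_neg h, if_neg h]

-- ---- the value computed by get_lower_range equals the arithmetic lower bound ----

theorem strip_t9 (n : Nat) : ∀ sc : Int,
    pvStrip (n : Int) sc = (((n / 10 ^ t9 n : Nat) : Int), sc * ((10 ^ t9 n : Nat) : Int)) := by
  induction n using Nat.strong_induction_on with
  | _ n ih =>
    intro sc
    rw [pvStrip_natCast]
    by_cases h : n % 10 = 9
    · have ht : t9 n = t9 (n / 10) + 1 := by rw [t9]; simp [h]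
      rw [if_pos h, ih (n / 10) (by omega) (sc * 10), ht]
      have e1 : n / 10 / 10 ^ t9 (n / 10) = n / 10 ^ (t9 (n / 10) + 1) := by
        rw [Nat.div_div_eq_div_mul, pow_succ]; ring_nf
      rw [e1]
      congr 1
      push_cast [pow_succ]
      ring
    · have ht : t9 n = 0 := by rw [t9]; simp [h]
      rw [if_neg h, ht]
      simp


theorem pvLowB_lowN (n : Nat) : pvLowB (n : Int) = ((lowN n : Nat) : Int) := by
  unfold pvLowB lowN
  rw [strip_t9 n 10]
  have hfd : PySem.Int.floordiv ((n / 10 ^ t9 n : Nat) : Int) 10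
      = ((n / 10 ^ t9 n / 10 : Nat) : Int) := by
    exact_mod_cast PySem.Int.floordiv_natCast (n / 10 ^ t9 n) 10
  rw [hfd]
  have e1 : n / 10 ^ t9 n / 10 = n / 10 ^ (t9 n + 1) := by
    rw [Nat.div_div_eq_div_mul, pow_succ]
  rw [e1]
  push_cast [pow_succ]
  ring


theorem coreVal (n : Nat) :
    pvDigitsVal (pvGlrLoop (Nat.toDigits 10 n) ((Nat.toDigits 10 n).length - 1))
      = pvLowB (n : Int) := by
  induction n using Nat.strong_induction_on with
  | _ n ih =>
    by_cases h : n < 10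
    · rw [toDigits10_small h]
      have hval : pvDigitsVal (pvGlrLoop [Nat.digitChar n] 0) = 0 := by
        simp only [pvGlrLoop]
        split <;> rfl
      rw [show ([Nat.digitChar n].length - 1) = 0 from rfl, hval]
      unfold pvLowB
      by_cases h9 : n % 10 = 9
      · have hn9 : n = 9 := by omega
        subst hn9
        have e1 : pvStrip ((9 : Nat) : Int) 10 = pvStrip ((9 / 10 : Nat) : Int) (10 * 10) := by
          rw [pvStrip_natCast, if_pos (by decide : (9:Nat) % 10 = 9)]
        have e2 : pvStrip ((9 / 10 : Nat) : Int) (10 * 10) = (((9 / 10 : Nat) : Int), 10 * 10) := by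
          rw [pvStrip_natCast, if_neg (by decide : ¬((9:Nat) / 10 % 10 = 9))]
        rw [e1, e2]
        decide
      · rw [pvStrip_natCast, if_neg h9]
        have h0 : n / 10 = 0 := by omega
        have hdiv : PySem.Int.floordiv (n : Int) 10 = ((n / 10 : Nat) : Int) := by
          exact_mod_cast PySem.Int.floordiv_natCast n 10
        rw [hdiv, h0]
        simp
    · -- n ≥ 10 : str(n) = str(n/10) ++ [digit of n%10]
      have hstep := toDigits10_step (show 10 ≤ n by omega)
      set t := Nat.toDigits 10 (n / 10) with ht
      have htne : t ≠ [] := by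
        by_cases hs : n / 10 < 10
        · rw [ht, toDigits10_small hs]; simp
        · rw [ht, toDigits10_step (by omega)]; simp
      have htlen : 1 ≤ t.length := List.length_pos_iff.mpr htne
      have hslen : (Nat.toDigits 10 n).length - 1 = t.length := by
        rw [hstep]; simp
      rw [hslen, hstep]
      have hget : (t ++ [Nat.digitChar (n % 10)]).getD t.length ' ' = Nat.digitChar (n % 10) := by
        rw [List.getD_eq_getElem?_getD, List.getElem?_append_right (le_refl _)]
        simp
      have htake : (t ++ [Nat.digitChar (n % 10)]).take t.length = t := by simp
      have hdrop : (t ++ [Nat.digitChar (n % 10)]).drop (t.length + 1) = [] := by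
        apply List.drop_of_length_le
        simp
      by_cases h9 : n % 10 = 9
      · have hd9 : Nat.digitChar (n % 10) = '9' := (digitChar_eq_nine_iff (by omega)).mpr h9
        obtain ⟨i, hi⟩ : ∃ i, t.length = i + 1 := ⟨t.length - 1, by omega⟩
        rw [hi]
        simp only [pvGlrLoop]
        rw [← hi, hget, if_pos hd9, htake, hdrop]
        have happ : pvGlrLoop (t ++ '0' :: []) i = pvGlrLoop t i ++ ['0'] :=
          pvGlrLoop_append i t ['0'] (by omega)
        rw [happ, pvDigitsVal_append, show (('0'.toNat : Int) - 48) = 0 from rfl]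
        have hrec := ih (n / 10) (by omega)
        rw [← ht] at hrec
        rw [show i = t.length - 1 by omega, hrec]
        unfold pvLowB
        rw [pvStrip_natCast n 10, if_pos h9,
          pvStrip_scale ((n / 10 : Nat)) ((n / 10 : Nat) : Int) 10 (by omega)]
        ring
      · have hd9 : Nat.digitChar (n % 10) ≠ '9' := fun hc =>
          h9 ((digitChar_eq_nine_iff (by omega)).mp hc)
        obtain ⟨i, hi⟩ : ∃ i, t.length = i + 1 := ⟨t.length - 1, by omega⟩
        rw [hi]
        simp only [pvGlrLoop]
        rw [← hi, hget, if_neg hd9, htake, hdrop]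
        rw [show (t ++ '0' :: []) = t ++ ['0'] from rfl, pvDigitsVal_append,
          show (('0'.toNat : Int) - 48) = 0 from rfl, ht, pvDigitsVal_toDigits]
        unfold pvLowB
        rw [pvStrip_natCast n 10, if_neg h9]
        have hdiv : PySem.Int.floordiv (n : Int) 10 = ((n / 10 : Nat) : Int) := by
          exact_mod_cast PySem.Int.floordiv_natCast n 10
        rw [hdiv]
        ring

theorem core_lower (n : Nat) :
    pvGetLowerRange (n : Int) = (pvLowB (n : Int), (n : Int)) := by
  have hchars : PySem.Int.toChars (n : Int) = Nat.toDigits 10 n := by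
    simp [PySem.Int.toChars]
  have hnm : (pvGlrLoop (Nat.toDigits 10 n) ((Nat.toDigits 10 n).length - 1)).head? ≠ some '-' := by
    intro hh
    have hmem : '-' ∈ pvGlrLoop (Nat.toDigits 10 n) ((Nat.toDigits 10 n).length - 1) := by
      cases hg : pvGlrLoop (Nat.toDigits 10 n) ((Nat.toDigits 10 n).length - 1) with
      | nil => rw [hg] at hh; simp at hh
      | cons a l => rw [hg] at hh; simp at hh; simp [hh]
    rcases pvGlrLoop_mem _ _ _ hmem with h | h
    · simp at h
    · obtain ⟨r, hr, hr2⟩ := toDigits_chars n _ h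
      exact digitChar_ne_minus hr hr2.symm
  unfold pvGetLowerRange pvParseInt
  simp only [hchars]
  rw [if_neg hnm, coreVal n]

-- ---- t9 / lowN / trunc arithmetic ----

theorem t9_mod (n : Nat) : n % 10 ^ t9 n = 10 ^ t9 n - 1 := by
  induction n using Nat.strong_induction_on with
  | _ n ih =>
    by_cases h : n % 10 = 9
    · have ht : t9 n = t9 (n / 10) + 1 := by rw [t9]; simp [h]
      have hih := ih (n / 10) (by omega)
      have hp : 0 < 10 ^ t9 (n / 10) := Nat.pow_pos (by omega)
      rw [ht, pow_succ, mul_comm, Nat.mod_mul, h, hih]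
      omega
    · have ht : t9 n = 0 := by rw [t9]; simp [h]
      rw [ht]
      omega


theorem t9_digit (n : Nat) : n / 10 ^ t9 n % 10 ≠ 9 := by
  induction n using Nat.strong_induction_on with
  | _ n ih =>
    by_cases h : n % 10 = 9
    · have ht : t9 n = t9 (n / 10) + 1 := by rw [t9]; simp [h]
      have e1 : n / 10 ^ (t9 (n / 10) + 1) = n / 10 / 10 ^ t9 (n / 10) := by
        rw [Nat.div_div_eq_div_mul, pow_succ]; ring_nf
      rw [ht, e1]
      exact ih (n / 10) (by omega)
    · have ht : t9 n = 0 := by rw [t9]; simp [h]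
      rw [ht]
      simpa using h


theorem lowN_le (n : Nat) : lowN n ≤ n := Nat.div_mul_le_self _ _

theorem truncTrunc (m j k : Nat) (h : j ≤ k) :
    (m / 10 ^ j * 10 ^ j) / 10 ^ k * 10 ^ k = m / 10 ^ k * 10 ^ k := by
  obtain ⟨d, rfl⟩ : ∃ d, k = j + d := ⟨k - j, by omega⟩
  rw [pow_add, ← Nat.div_div_eq_div_mul, ← Nat.div_div_eq_div_mul,
    Nat.mul_div_cancel _ (Nat.pow_pos (by omega))]


theorem trunc_anti (n : Nat) {k k' : Nat} (h : k ≤ k') : trunc n k' ≤ trunc n k := by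
  have hd : 10 ^ k ∣ trunc n k' :=
    dvd_trans (pow_dvd_pow 10 h) (dvd_mul_left _ _)
  calc trunc n k' = trunc n k' / 10 ^ k * 10 ^ k := (Nat.div_mul_cancel hd).symm
    _ ≤ (n + 1) / 10 ^ k * 10 ^ k := by
        apply Nat.mul_le_mul_right
        exact Nat.div_le_div_right (Nat.div_mul_le_self _ _)
    _ = trunc n k := rfl


theorem trunc_low (n k : Nat) (h : k ≤ t9 n) : trunc n k = n + 1 := by
  have h1 := t9_mod n
  have hp : 0 < 10 ^ t9 n := Nat.pow_pos (by omega)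
  have h2 := Nat.div_add_mod n (10 ^ t9 n)
  have hdvd : 10 ^ t9 n ∣ n + 1 := ⟨n / 10 ^ t9 n + 1, by
    rw [Nat.mul_add, Nat.mul_one]
    omega⟩
  have hdvd2 : 10 ^ k ∣ n + 1 := dvd_trans (pow_dvd_pow 10 h) hdvd
  unfold trunc
  exact Nat.div_mul_cancel hdvd2


theorem trunc_t1 (n : Nat) : trunc n (t9 n + 1) = lowN n := by
  have h1 := t9_mod n
  have hp : 0 < 10 ^ t9 n := Nat.pow_pos (by omega)
  have h2 := Nat.div_add_mod n (10 ^ t9 n)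
  have hn1 : n + 1 = 10 ^ t9 n * (n / 10 ^ t9 n + 1) := by
    rw [Nat.mul_add, Nat.mul_one]
    omega
  have e1 : (n + 1) / 10 ^ (t9 n + 1) = (n / 10 ^ t9 n + 1) / 10 := by
    rw [hn1, pow_succ, Nat.mul_div_mul_left _ 10 hp]
  have e2 : n / 10 ^ (t9 n + 1) = n / 10 ^ t9 n / 10 := by
    rw [Nat.div_div_eq_div_mul, pow_succ]
  have e3 : (n / 10 ^ t9 n + 1) / 10 = n / 10 ^ t9 n / 10 := by
    have := t9_digit n
    omega
  unfold trunc lowN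
  rw [e1, e3, ← e2]


theorem trunc_after (n k : Nat) (h : t9 n + 1 ≤ k) : trunc n k = lowN n / 10 ^ k * 10 ^ k := by
  rw [← trunc_t1]
  unfold trunc
  exact (truncTrunc (n + 1) (t9 n + 1) k h).symm


-- ---- keptB machinery ----

theorem kB_stop (n k b : Nat) (h : b ≤ k) : keptB n k b = [] := by
  unfold keptB
  rw [Nat.sub_eq_zero_of_le h]
  rfl


theorem kB_cons (n k b : Nat) (h : k < b) :
    keptB n k b = (match entryf n k with
      | some v => v :: keptB n (k + 1) b
      | none => keptB n (k + 1) b) := by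
  unfold keptB
  rw [show b - k = (b - (k + 1)) + 1 by omega, List.range'_succ]
  cases he : entryf n k <;> simp [he]


theorem entryf_none_big (n j : Nat) (h : 10 ^ j > n + 1) : entryf n j = none := by
  have h0 : trunc n j = 0 := by
    unfold trunc
    rw [Nat.div_eq_of_lt (by omega)]
    simp
  unfold entryf
  rw [if_neg]
  rintro ⟨h1, h2⟩
  omega


theorem entryf_none_ge (n j : Nat) (h : n + 1 ≤ j) : entryf n j = none := by
  apply entryf_none_big
  calc n + 1 ≤ j := h
    _ < 10 ^ j := Nat.lt_pow_self (by omega)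


theorem kB_nil_of_pow (n b : Nat) : ∀ k, 10 ^ k > n + 1 → keptB n k b = [] := by
  intro k hk
  unfold keptB
  rw [List.filterMap_eq_nil_iff]
  intro j hj
  rw [List.mem_range'_1] at hj
  exact entryf_none_big n j (lt_of_lt_of_le hk (Nat.pow_le_pow_right (by omega) hj.1))


theorem kB_pad (n k b : Nat) (hb : n + 1 ≤ b) : keptB n k (b + 1) = keptB n k b := by
  by_cases h : k ≤ b
  · unfold keptB
    rw [show b + 1 - k = (b - k) + 1 by omega, List.range'_1_concat,
      List.filterMap_append, show k + (b - k) = b by omega,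
      show List.filterMap (entryf n) [b] = [] by simp [entryf_none_ge n b hb]]
    simp
  · rw [kB_stop n k (b + 1) (by omega), kB_stop n k b (by omega)]


theorem kB_any (n k b1 b2 : Nat) (h1 : n + 1 ≤ b1) (h2 : b1 ≤ b2) :
    keptB n k b2 = keptB n k b1 := by
  obtain ⟨d, rfl⟩ : ∃ d, b2 = b1 + d := ⟨b2 - b1, by omega⟩
  induction d with
  | zero => rfl
  | succ e ih =>
    rw [show b1 + (e + 1) = (b1 + e) + 1 by omega, kB_pad n k (b1 + e) (by omega)]
    exact ih (by omega)


theorem kB_skip (n b : Nat) : ∀ (d j : Nat), (∀ i, j ≤ i → i < j + d → entryf n i = none) →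
    keptB n j b = keptB n (j + d) b := by
  intro d
  induction d with
  | zero => intro j _; rfl
  | succ e ih =>
    intro j hnone
    by_cases hjb : j < b
    · rw [kB_cons n j b hjb, hnone j le_rfl (by omega)]
      have := ih (j + 1) (fun i h1 h2 => hnone i (by omega) (by omega))
      rw [this, show j + 1 + e = j + (e + 1) by omega]
    · rw [kB_stop n j b (by omega), kB_stop n (j + (e + 1)) b (by omega)]


theorem kB_ext (n m b : Nat) : ∀ k, (∀ j, k ≤ j → entryf n j = entryf m j) →
    keptB n k b = keptB m k b := by
  intro k hext
  unfold keptB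
  apply List.filterMap_congr
  intro j hj
  rw [List.mem_range'_1] at hj
  exact hext j hj.1


-- ---- the cuts loop computes keptB ----

theorem kB_nil_entries (n k b : Nat) (h : ∀ j, k ≤ j → entryf n j = none) : keptB n k b = [] := by
  unfold keptB
  rw [List.filterMap_eq_nil_iff]
  intro j hj
  rw [List.mem_range'_1] at hj
  exact h j hj.1

theorem cutsLoop_eq (n : Nat) : ∀ (fuel k : Nat) (desc : List Int),
    10 ^ (k + fuel) > n + 1 →
    pvCutsLoop (n : Int) fuel (((10 ^ k : Nat) : Int)) desc = desc ++ keptB n k (n + 2) := by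
  intro fuel
  induction fuel with
  | zero =>
    intro k desc hpow
    rw [kB_nil_of_pow n (n + 2) k (by simpa using hpow)]
    simp [pvCutsLoop]
  | succ f ih =>
    intro k desc hpow
    by_cases hp : (10 : Nat) ^ k ≤ n + 1
    · have hk10 : k < 10 ^ k := Nat.lt_pow_self (by omega)
      have hkb : k < n + 2 := by omega
      have hcast1 : ((n : Int) + 1) = ((n + 1 : Nat) : Int) := by push_cast; ring
      have hfd1 : PySem.Int.floordiv ((n : Int) + 1) ((10 ^ k : Nat) : Int)
          = (((n + 1) / 10 ^ k : Nat) : Int) := by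
        rw [hcast1]
        exact_mod_cast PySem.Int.floordiv_natCast (n + 1) (10 ^ k)
      have hp10 : ((10 ^ k : Nat) : Int) * 10 = ((10 ^ (k + 1) : Nat) : Int) := by
        push_cast [pow_succ]; ring
      have hfd2 : PySem.Int.floordiv ((n : Int) + 1) (((10 ^ k : Nat) : Int) * 10)
          = (((n + 1) / 10 ^ (k + 1) : Nat) : Int) := by
        rw [hcast1, hp10]
        exact_mod_cast PySem.Int.floordiv_natCast (n + 1) (10 ^ (k + 1))
      have hv : PySem.Int.floordiv ((n : Int) + 1) ((10 ^ k : Nat) : Int) * ((10 ^ k : Nat) : Int)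
          = ((trunc n k : Nat) : Int) := by
        rw [hfd1]; unfold trunc; push_cast; ring
      have hv2 : PySem.Int.floordiv ((n : Int) + 1) (((10 ^ k : Nat) : Int) * 10) * (((10 ^ k : Nat) : Int) * 10)
          = ((trunc n (k + 1) : Nat) : Int) := by
        rw [hfd2, hp10]; unfold trunc; push_cast; ring
      simp only [pvCutsLoop]
      rw [if_pos (by exact_mod_cast (by omega : ((10 ^ k : Nat) : Int) ≤ (n : Int) + 1))]
      rw [hv, hv2, hp10]
      rw [ih (k + 1) _ (by rw [show k + 1 + f = k + (f + 1) by omega]; exact hpow)]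
      rw [kB_cons n k (n + 2) hkb]
      unfold entryf
      by_cases hc : trunc n k ≤ n ∧ trunc n (k + 1) < trunc n k
      · rw [if_pos ⟨by exact_mod_cast hc.1, by exact_mod_cast hc.2⟩, if_pos hc]
        simp
      · rw [if_neg (by rintro ⟨h1, h2⟩; exact hc ⟨by exact_mod_cast h1, by exact_mod_cast h2⟩), if_neg hc]
    · simp only [pvCutsLoop]
      rw [if_neg (by exact_mod_cast (by omega : ¬ ((10 ^ k : Nat) : Int) ≤ (n : Int) + 1))]
      rw [kB_nil_of_pow n (n + 2) k (by omega)]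
      simp


-- ---- keptB equals the recursive descSpec ----

theorem lowN_dvd_pow (n j : Nat) (hj : j ≤ t9 n + 1) : 10 ^ j ∣ lowN n :=
  dvd_trans (pow_dvd_pow 10 hj) (dvd_mul_left _ _)

theorem n'_trunc (n j : Nat) (h0 : lowN n ≠ 0) (hj : t9 n + 1 ≤ j) :
    trunc (lowN n - 1) j = trunc n j := by
  show (lowN n - 1 + 1) / 10 ^ j * 10 ^ j = trunc n j
  rw [show lowN n - 1 + 1 = lowN n by omega]
  exact (trunc_after n j hj).symm

theorem n'_trunc_small (n j : Nat) (h0 : lowN n ≠ 0) (hj : j ≤ t9 n + 1) :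
    trunc (lowN n - 1) j = lowN n := by
  show (lowN n - 1 + 1) / 10 ^ j * 10 ^ j = lowN n
  rw [show lowN n - 1 + 1 = lowN n by omega]
  exact Nat.div_mul_cancel (lowN_dvd_pow n j hj)

theorem entryf_eq_n' (n j : Nat) (h0 : lowN n ≠ 0) (hj : t9 n + 1 ≤ j)
    (hlt : trunc n j < lowN n) : entryf n j = entryf (lowN n - 1) j := by
  unfold entryf
  rw [n'_trunc n j h0 hj, n'_trunc n (j + 1) h0 (by omega)]
  have hle := lowN_le n
  have hA1 : trunc n j ≤ n := by omega
  have hA2 : trunc n j ≤ lowN n - 1 := by omega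
  by_cases hB : trunc n (j + 1) < trunc n j
  · rw [if_pos ⟨hA1, hB⟩, if_pos ⟨hA2, hB⟩]
  · rw [if_neg (by rintro ⟨_, hh⟩; exact hB hh), if_neg (by rintro ⟨_, hh⟩; exact hB hh)]

theorem lowN_ge_pow (n k : Nat) (h0 : lowN n ≠ 0) (htr : trunc n k = lowN n) :
    10 ^ k ≤ lowN n := by
  have h1 : lowN n = (n + 1) / 10 ^ k * 10 ^ k := htr.symm
  rcases Nat.eq_zero_or_pos ((n + 1) / 10 ^ k) with hq | hq
  · exact absurd (by rw [h1, hq, Nat.zero_mul]) h0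
  · calc 10 ^ k = 1 * 10 ^ k := (Nat.one_mul _).symm
      _ ≤ (n + 1) / 10 ^ k * 10 ^ k := Nat.mul_le_mul_right _ hq
      _ = lowN n := h1.symm

theorem plateauR (n : Nat) (h0 : lowN n ≠ 0) : ∀ (m : Nat), ∀ (k : Nat), n + 1 ≤ k + m →
    t9 n + 1 ≤ k → trunc n k = lowN n →
    keptB n k (n + 2) = ((lowN n : Int)) :: keptB (lowN n - 1) k (n + 2) := by
  intro m
  induction m with
  | zero =>
    intro k hkm hk htr
    exfalso
    have hk10 : k < 10 ^ k := Nat.lt_pow_self (by omega)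
    have hge := lowN_ge_pow n k h0 htr
    have hle := lowN_le n
    omega
  | succ m ih =>
    intro k hkm hk htr
    have hk10 : k < 10 ^ k := Nat.lt_pow_self (by omega)
    have hge := lowN_ge_pow n k h0 htr
    have hle := lowN_le n
    have hkb : k < n + 2 := by omega
    have hA1 : trunc n k ≤ n := by omega
    have hn'k : entryf (lowN n - 1) k = none := by
      unfold entryf
      rw [if_neg]
      rintro ⟨h1, _⟩
      rw [n'_trunc n k h0 hk, htr] at h1
      omega
    by_cases hdrop : trunc n (k + 1) < trunc n k
    · have hent : entryf n k = some ((lowN n : Int)) := by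
        unfold entryf
        rw [if_pos ⟨hA1, hdrop⟩, htr]
      rw [kB_cons n k (n + 2) hkb, hent]
      have hext : keptB n (k + 1) (n + 2) = keptB (lowN n - 1) (k + 1) (n + 2) := by
        apply kB_ext
        intro j hj
        apply entryf_eq_n' n j h0 (by omega)
        calc trunc n j ≤ trunc n (k + 1) := trunc_anti n hj
          _ < trunc n k := hdrop
          _ = lowN n := htr
      rw [hext, kB_cons (lowN n - 1) k (n + 2) hkb, hn'k]
    · have hplat : trunc n (k + 1) = lowN n := by
        have := trunc_anti n (show k ≤ k + 1 by omega)
        omega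
      have hent : entryf n k = none := by
        unfold entryf
        rw [if_neg]
        rintro ⟨_, hh⟩
        exact hdrop hh
      rw [kB_cons n k (n + 2) hkb, hent, ih (k + 1) (by omega) (by omega) hplat,
        kB_cons (lowN n - 1) k (n + 2) hkb, hn'k]

theorem kept_eq_descSpec (n : Nat) : keptB n 0 (n + 2) = descSpec n := by
  induction n using Nat.strong_induction_on with
  | _ n ih =>
    have hskip : keptB n 0 (n + 2) = keptB n (t9 n + 1) (n + 2) := by
      have hs := kB_skip n (n + 2) (t9 n + 1) 0 (fun i h1 h2 => by
        unfold entryf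
        rw [if_neg]
        rintro ⟨hc, _⟩
        rw [trunc_low n i (by omega)] at hc
        omega)
      simpa using hs
    by_cases h0 : lowN n = 0
    · rw [descSpec, dif_pos h0, hskip]
      apply kB_nil_entries
      intro j hj
      unfold entryf
      rw [if_neg]
      rintro ⟨_, hd⟩
      have hz : trunc n j = 0 := by rw [trunc_after n j hj, h0, Nat.zero_div, Nat.zero_mul]
      omega
    · have hle := lowN_le n
      have hstep := plateauR n h0 (n + 1) (t9 n + 1) (by omega) le_rfl (trunc_t1 n)
      have hskip' : keptB (lowN n - 1) 0 (n + 2) = keptB (lowN n - 1) (t9 n + 1) (n + 2) := by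
        have hs := kB_skip (lowN n - 1) (n + 2) (t9 n + 1) 0 (fun i h1 h2 => by
          unfold entryf
          rw [if_neg]
          rintro ⟨hc, _⟩
          rw [n'_trunc_small n i h0 (by omega)] at hc
          omega)
        simpa using hs
      have hany : keptB (lowN n - 1) 0 (n + 2) = keptB (lowN n - 1) 0 ((lowN n - 1) + 2) :=
        kB_any (lowN n - 1) 0 ((lowN n - 1) + 2) (n + 2) (by omega) (by omega)
      rw [descSpec, dif_neg h0, hskip, hstep, ← hskip', hany, ih (lowN n - 1) (by omega)]


-- ---- pairing lemmas ----

theorem pairUp_append (b : Int) : ∀ (xs : List Int) (c e : Int),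
    pvPairUp b e (xs ++ [c]) = pvPairUp b (c - 1) xs ++ (if b < e then [(c, e)] else []) := by
  intro xs
  induction xs with
  | nil =>
    intro c e
    by_cases h : b < e <;> simp [pvPairUp, pvUpOf, h]
  | cons x xs ihx =>
    intro c e
    simp only [List.cons_append, pvPairUp]
    have hup : pvUpOf e (xs ++ [c]) = pvUpOf (c - 1) xs := by
      cases xs <;> simp [pvUpOf]
    rw [hup, ihx c e]
    by_cases h : b < pvUpOf (c - 1) xs
    · rw [if_pos h, if_pos h]; simp
    · rw [if_neg h, if_neg h]


theorem pairUp_nil_of_le (b e : Int) : ∀ (lst : List Int), e ≤ b →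
    (∀ x ∈ lst, x ≤ e + 1) → pvPairUp b e lst = [] := by
  intro lst
  induction lst with
  | nil => intro _ _; rfl
  | cons x xs ihx =>
    intro hle hmem
    simp only [pvPairUp]
    have hup : pvUpOf e xs ≤ e := by
      cases xs with
      | nil => simp [pvUpOf]
      | cons y ys =>
        have := hmem y (by simp)
        simp only [pvUpOf]
        omega
    rw [if_neg (by omega)]
    exact ihx hle (fun z hz => hmem z (by simp [hz]))


theorem descSpec_mem_le (n : Nat) : ∀ x ∈ descSpec n, x ≤ (n : Int) := by
  induction n using Nat.strong_induction_on with
  | _ n ih =>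
    intro x hx
    rw [descSpec] at hx
    by_cases h0 : lowN n = 0
    · rw [dif_pos h0] at hx
      simp at hx
    · rw [dif_neg h0] at hx
      have hle := lowN_le n
      rcases List.mem_cons.mp hx with h | h
      · subst h
        exact_mod_cast hle
      · have h1 := ih (lowN n - 1) (by omega) x h
        have h2 : ((lowN n - 1 : Nat) : Int) ≤ (n : Int) := by omega
        omega


-- ---- A's loop ----

theorem loopA_acc (b : Int) : ∀ (fuel : Nat) (e : Int) (acc : List (Int × Int)),
    pvLoopA b fuel e acc = acc ++ pvLoopA b fuel e [] := by
  intro fuel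
  induction fuel with
  | zero => intro e acc; simp [pvLoopA]
  | succ f ihf =>
    intro e acc
    simp only [pvLoopA]
    by_cases h : b < e
    · rw [if_pos h, if_pos h, ihf _ (acc ++ [_]), ihf _ ([] ++ [_])]
      simp
    · rw [if_neg h, if_neg h]
      simp

theorem loopA_stop (b e : Int) (f : Nat) (h : ¬ b < e) : pvLoopA b f e [] = [] := by
  cases f <;> simp [pvLoopA, h]


theorem mainM (n : Nat) : ∀ (b : Int), -1 ≤ b → b < (n : Int) → ∀ fuel, ((n : Int) - b).toNat ≤ fuel →
    pvLoopA b fuel (n : Int) [] = (pvPairUp b (n : Int) (0 :: (descSpec n).reverse)).reverse := by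
  induction n using Nat.strong_induction_on with
  | _ n ih =>
    intro b hb hbn fuel hfuel
    cases fuel with
    | zero => omega
    | succ f =>
      simp only [pvLoopA]
      rw [if_pos hbn, core_lower n, pvLowB_lowN n]
      simp only []
      rw [loopA_acc b f _ _]
      by_cases h0 : lowN n = 0
      · rw [descSpec, dif_pos h0]
        have hm1 : ((lowN n : Nat) : Int) - 1 = -1 := by rw [h0]; simp
        rw [hm1, loopA_stop b (-1) f (by omega)]
        simp only [pvPairUp, pvUpOf, List.reverse_nil, if_pos hbn, h0]
        simp
      · have hle := lowN_le n
        have hcast : ((lowN n : Nat) : Int) - 1 = ((lowN n - 1 : Nat) : Int) := by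
          omega
        rw [descSpec, dif_neg h0, hcast]
        rw [show (0 : Int) :: (((lowN n : Nat) : Int) :: descSpec (lowN n - 1)).reverse
              = (0 :: (descSpec (lowN n - 1)).reverse) ++ [((lowN n : Nat) : Int)] from by simp]
        rw [pairUp_append b (0 :: (descSpec (lowN n - 1)).reverse) ((lowN n : Nat) : Int) (n : Int),
          if_pos hbn, hcast]
        by_cases hb' : b < ((lowN n - 1 : Nat) : Int)
        · rw [ih (lowN n - 1) (by omega) b hb hb' f (by omega)]
          simp
        · rw [loopA_stop b _ f hb']
          rw [pairUp_nil_of_le b ((lowN n - 1 : Nat) : Int) (0 :: (descSpec (lowN n - 1)).reverse)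
            (by omega) ?_]
          · simp
          · intro x hx
            rcases List.mem_cons.mp hx with rfl | hx2
            · have h1 : (0 : Int) ≤ ((lowN n - 1 : Nat) : Int) := by positivity
              omega
            · have := descSpec_mem_le (lowN n - 1) x (List.mem_reverse.mp hx2)
              omega


-- ===== VERDICT (by name: the statement is the Claim_ definition above) =====
theorem split_range_right_spec : Claim_equal_split_range_right := by
  intro b e _hdom hpre
  unfold Spec_split_range_right split_range_right split_range_right_alt
  by_cases he : e ≤ b
  · rw [if_pos he, show (e - b).toNat = 0 by omega]
    rfl
  · rw [if_neg he]
    have hb : -1 ≤ b := by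
      rcases hpre with h | h
      · omega
      · exact h
    obtain ⟨m, rfl⟩ : ∃ m : Nat, e = (m : Int) := ⟨e.toNat, by omega⟩
    rw [mainM m b hb (by omega) (((m : Int) - b).toNat) le_rfl, List.reverse_reverse]
    have hfuel : ((m : Int) + 1).toNat + 1 = m + 2 := by omega
    have h1 : (1 : Int) = ((10 ^ 0 : Nat) : Int) := by norm_num
    have hpow : 10 ^ (0 + (m + 2)) > m + 1 := by
      have h2 := Nat.lt_pow_self (show (1:Nat) < 10 by omega) (n := m + 2)
      simp only [Nat.zero_add]
      omega
    rw [hfuel, h1, cutsLoop_eq m (m + 2) 0 [] hpow, kept_eq_descSpec m]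
    rfl
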